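-- pv_equiv track=rewrite | github.com/wm389751584x/leetcodeformeng | 390_lastRemaining_1.py | lastRemaining
-- ===== SOURCE A (Python) =====
-- def lastRemaining(n: int) -> int:
--     res = [0] * n
--     for i in range(1, n+1):
--         res[i-1] = i
--
--     while len(res) > 1:
--         i = 0
--         while i < len(res):
--             res.pop(i)
--             i += 2
--         res.reverse()
--
--     return res[0]
-- ===== SOURCE B (Python) =====
-- def lastRemaining(n: int) -> int:
--     # Trace the survivor's position backwards through round lengths:
--     # one round of A keeps, from a list of length m, the elements at
--     # indices j+j//2+1 (j = 0..m2-1, m2 = m - ceil(m/3)) and reverses.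
--     def pos(m: int) -> int:
--         # index of the survivor in a list of length m
--         if m <= 1:
--             return 0
--         m2 = m - (m + 2) // 3
--         j = m2 - 1 - pos(m2)
--         return j + j // 2 + 1
--     return pos(n) + 1
-- ===== Notes on version B (the rewrite author's own statement) =====
-- stated objective: faster
-- what changed: Instead of materialising the list 1..n and repeatedly popping/reversing it (quadratic), B traces the survivor's index backwards through the sequence of round lengths with the recurrence pos(m) = j + j//2 + 1, j = m2 - 1 - pos(m2), m2 = m - ceil(m/3), touching no list at all.
-- outside the precondition, e.g. on lastRemaining(0): A raises IndexError, B returns 1; on lastRemaining(-2): A raises IndexError, B returns 1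
import Mathlib
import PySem

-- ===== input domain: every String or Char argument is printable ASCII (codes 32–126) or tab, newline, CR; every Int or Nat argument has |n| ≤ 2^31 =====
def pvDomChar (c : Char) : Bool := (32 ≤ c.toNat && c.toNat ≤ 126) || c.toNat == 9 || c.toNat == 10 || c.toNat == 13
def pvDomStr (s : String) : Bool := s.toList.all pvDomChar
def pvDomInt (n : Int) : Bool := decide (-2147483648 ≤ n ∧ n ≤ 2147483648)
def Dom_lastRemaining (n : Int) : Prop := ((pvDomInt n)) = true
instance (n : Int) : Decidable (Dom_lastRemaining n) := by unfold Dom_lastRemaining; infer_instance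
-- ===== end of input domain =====

-- B replaces A's quadratic pop/reverse simulation by an O(log n) backward trace of the
-- survivor's index through the round lengths; equivalence is proved for all n ≥ 1.

-- ===== PORT A =====
-- res = [0]*n; for i in range(1, n+1): res[i-1] = i
def pvBuild (n : Int) : List Int :=
  (PySem.List.pyRange 1 (n + 1) 1).foldl
    (fun r i => PySem.List.pySetD r (i - 1) i) (List.replicate n.toNat 0)

-- inner loop: while i < len(res): res.pop(i); i += 2   (i stays ≥ 0, so a Nat index;
-- pop(i) with 0 ≤ i < len removes the element: List.eraseIdx, its return value is discarded)
def pvPopLoop (res : List Int) (i : Nat) : List Int :=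
  if h : i < res.length then pvPopLoop (res.eraseIdx i) (i + 2) else res
termination_by res.length
decreasing_by simp [List.length_eraseIdx, h]; all_goals omega

-- helper fact the outer loop's termination cites
theorem pvPopLoop_length_le : ∀ (res : List Int) (i : Nat),
    (pvPopLoop res i).length ≤ res.length := by
  intro res i
  fun_induction pvPopLoop res i with
  | case1 res i h ih =>
    calc _ ≤ (res.eraseIdx i).length := ih
    _ ≤ res.length := by simp [List.length_eraseIdx, h]
  | case2 res i _h => exact le_refl _


theorem pvPopLoop_length_lt : ∀ (res : List Int) (i : Nat), i < res.length →
    (pvPopLoop res i).length < res.length := by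
  intro res i h
  rw [pvPopLoop]
  simp only [h, dif_pos]
  calc (pvPopLoop (res.eraseIdx i) (i+2)).length ≤ (res.eraseIdx i).length := pvPopLoop_length_le _ _
  _ < res.length := by simp [List.length_eraseIdx, h]; all_goals omega

-- outer loop: while len(res) > 1: <inner loop>; res.reverse()
def pvSweep (res : List Int) : List Int :=
  if _h : 1 < res.length then pvSweep ((pvPopLoop res 0).reverse) else res
termination_by res.length
decreasing_by simpa using pvPopLoop_length_lt res 0 (by omega)

def lastRemaining (n : Int) : Int :=
  PySem.List.pyGetD (pvSweep (pvBuild n)) 0 0   -- res[0]; Pre_ (n ≥ 1) keeps the index in range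

-- ===== PORT B =====
-- index of the survivor in a list of length m (Source B's recursive pos)
def pvPos (m : Int) : Int :=
  if h : m ≤ 1 then 0
  else
    let m2 := m - PySem.Int.floordiv (m + 2) 3
    let j := m2 - 1 - pvPos m2
    j + PySem.Int.floordiv j 2 + 1
termination_by m.toNat
decreasing_by
  simp only [PySem.Int.floordiv_eq_ediv_of_pos (by omega : (0:Int) < 3)]
  omega

def lastRemaining_alt (n : Int) : Int := pvPos n + 1

-- ===== PRECONDITION & SPEC =====
-- A raises IndexError (res[0] on []) for n ≤ 0; those inputs are excluded.
def Pre_lastRemaining (n : Int) : Prop := 1 ≤ n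
instance (n : Int) : Decidable (Pre_lastRemaining n) := by unfold Pre_lastRemaining; infer_instance
def pvWitness_lastRemaining : Int := (6)

def Spec_lastRemaining (n : Int) (out : Int) : Prop := out = lastRemaining_alt n
instance (n : Int) (out : Int) : Decidable (Spec_lastRemaining n out) := by unfold Spec_lastRemaining; infer_instance

-- ===== CLAIM (what is proved, stated in full; the proofs are below) =====
def Claim_equal_lastRemaining : Prop := ∀ (n : Int), Dom_lastRemaining n → Pre_lastRemaining n → Spec_lastRemaining n (lastRemaining n)

-- ===== LEMMAS AND PROOFS =====

-- one round of A in structural form: drop every element at index ≡ 0 (mod 3)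
def pvKeep3 : List Int → List Int
  | [] => []
  | _ :: l => l.take 2 ++ pvKeep3 (l.drop 2)
termination_by l => l.length
decreasing_by simp

theorem pvKeep3_cons (a : Int) (l : List Int) :
    pvKeep3 (a :: l) = l.take 2 ++ pvKeep3 (l.drop 2) := by rw [pvKeep3.eq_def]

theorem pvKeep3_nil : pvKeep3 [] = [] := by rw [pvKeep3.eq_def]

theorem pvPopLoop_eq : ∀ (res : List Int) (i : Nat),
    pvPopLoop res i = res.take i ++ pvKeep3 (res.drop i) := by
  intro res i
  fun_induction pvPopLoop res i with
  | case1 res i h ih =>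
    rw [ih, List.eraseIdx_eq_take_drop_succ]
    have hlen : (res.take i).length = i := by simp; omega
    rw [List.take_append, List.drop_append, hlen]
    have h1 : List.take (i+2) (res.take i) = res.take i :=
      List.take_of_length_le (by rw [hlen]; omega)
    have h2 : List.drop (i+2) (res.take i) = [] :=
      List.drop_eq_nil_of_le (by rw [hlen]; omega)
    have h3 : i + 2 - i = 2 := by omega
    rw [h1, h2, h3, List.drop_eq_getElem_cons h, pvKeep3_cons]
    simp
  | case2 res i h =>
    have hle : res.length ≤ i := by omega
    rw [List.take_of_length_le hle, List.drop_eq_nil_of_le hle, pvKeep3_nil]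
    simp

theorem pvKeep3_length (l : List Int) :
    (pvKeep3 l).length = l.length - (l.length + 2) / 3 := by
  fun_induction pvKeep3 l with
  | case1 => simp
  | case2 a l ih =>
    simp only [List.length_append, List.length_take, List.length_drop, List.length_cons, ih]
    omega

theorem pvKeep3_getElem? (l : List Int) : ∀ (j : Nat), j < (pvKeep3 l).length →
    (pvKeep3 l)[j]? = l[j + j / 2 + 1]? := by
  fun_induction pvKeep3 l with
  | case1 => intro j hj; simp at hj
  | case2 a l ih =>
    intro j hj
    by_cases hj2 : j < (l.take 2).length
    · rw [List.getElem?_append_left hj2]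
      have h2 : j < 2 := by simp at hj2; omega
      have hj' : j / 2 = 0 := by omega
      rw [hj', List.getElem?_take_of_lt (by omega)]
      simp
    · have hl2 : 2 ≤ l.length := by
        by_contra hc
        have hd : l.drop 2 = [] := List.drop_eq_nil_of_le (by omega)
        rw [hd, pvKeep3_nil] at hj
        simp at hj hj2
        omega
      have hlen2 : (l.take 2).length = 2 := by simp; omega
      rw [List.getElem?_append_right (by omega)]
      rw [hlen2] at hj2 ⊢
      have hj2' : 2 ≤ j := by omega
      have hlt : j - 2 < (pvKeep3 (l.drop 2)).length := by
        simp only [List.length_append, hlen2] at hj; omega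
      rw [ih (j - 2) hlt, List.getElem?_drop]
      have harith : 2 + (j - 2 + (j - 2) / 2 + 1) = j + j / 2 + 1 - 1 := by omega
      rw [harith]
      have hsplit : j + j / 2 + 1 = (j + j / 2 + 1 - 1) + 1 := by omega
      rw [hsplit, List.getElem?_cons_succ]
      simp

-- Nat mirror of B's pos, used to phrase the loop invariant (unfolding lemmas follow)
def pvPosN (m : Nat) : Nat :=
  if m ≤ 1 then 0
  else
    let m2 := m - (m + 2) / 3
    let j := m2 - 1 - pvPosN m2
    j + j / 2 + 1
termination_by m
decreasing_by omega

theorem pvPosN_base (m : Nat) (h : m ≤ 1) : pvPosN m = 0 := by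
  rw [pvPosN]; simp [h]

theorem pvPosN_step (m : Nat) (h : 1 < m) :
    pvPosN m = (m - (m + 2) / 3 - 1 - pvPosN (m - (m + 2) / 3)) +
      (m - (m + 2) / 3 - 1 - pvPosN (m - (m + 2) / 3)) / 2 + 1 := by
  rw [pvPosN]
  simp [Nat.not_le.mpr h]

theorem pvPosN_lt (m : Nat) (hm : 0 < m) : pvPosN m < m := by
  fun_induction pvPosN m with
  | case1 m h => omega
  | case2 m h ih => omega

theorem pvSweep_eq (res : List Int) (h : 0 < res.length) :
    pvSweep res = (res[pvPosN res.length]?).toList := by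
  fun_induction pvSweep res with
  | case1 res h1 ih =>
    have hkeep : pvPopLoop res 0 = pvKeep3 res := by
      rw [pvPopLoop_eq]; simp
    have hlen : ((pvPopLoop res 0).reverse).length = res.length - (res.length + 2) / 3 := by
      rw [List.length_reverse, hkeep, pvKeep3_length]
    have hpos : 0 < ((pvPopLoop res 0).reverse).length := by rw [hlen]; omega
    rw [ih hpos, hlen]
    set m := res.length with hm
    set m2 := m - (m + 2) / 3 with hm2
    have hplt : pvPosN m2 < m2 := pvPosN_lt m2 (by omega)
    have hrev : ((pvPopLoop res 0).reverse)[pvPosN m2]? = (pvKeep3 res)[m2 - 1 - pvPosN m2]? := by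
      rw [hkeep, List.getElem?_reverse (by rw [pvKeep3_length]; omega)]
      congr 1
      rw [pvKeep3_length]
    rw [hrev, pvKeep3_getElem? _ _ (by rw [pvKeep3_length]; omega)]
    rw [pvPosN_step m h1]
  | case2 res h1 =>
    have : res.length = 1 := by omega
    have hp : pvPosN res.length = 0 := by rw [this, pvPosN_base 1 (by omega)]
    rw [hp]
    obtain ⟨a, rfl⟩ := List.length_eq_one_iff.mp this
    rfl

theorem pvSetFold (f : Nat → Int) : ∀ (N : Nat) (init : List Int), N ≤ init.length →
    (List.range N).foldl (fun r k => r.set k (f k)) init =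
      (List.range N).map f ++ init.drop N := by
  intro N
  induction N with
  | zero => intro init _; simp
  | succ N ih =>
    intro init h
    rw [List.range_succ, List.foldl_append, List.map_append, ih init (by omega)]
    simp only [List.foldl_cons, List.foldl_nil, List.map_cons, List.map_nil]
    rw [List.set_append_right _ _ (by simp)]
    have hd : init.drop N = init[N] :: init.drop (N + 1) := List.drop_eq_getElem_cons (by omega)
    have hlen : (List.map f (List.range N)).length = N := by simp
    rw [hlen, Nat.sub_self, hd, List.set_cons_zero]
    simp

theorem pvBuild_eq (n : Int) (hn : 0 ≤ n) :
    pvBuild n = (List.range n.toNat).map (fun k : Nat => ((k : Int) + 1)) := by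
  unfold pvBuild
  rw [PySem.List.pyRange_one]
  have h1 : ((n + 1 : Int) - 1).toNat = n.toNat := by omega
  rw [h1, List.foldl_map]
  have hfun : ∀ (r : List Int) (k : Nat),
      PySem.List.pySetD r (1 + (k : Int) - 1) (1 + (k : Int)) = r.set k ((k : Int) + 1) := by
    intro r k
    have h2 : 1 + (k : Int) - 1 = (k : Int) := by omega
    have h3 : 1 + (k : Int) = (k : Int) + 1 := by omega
    rw [h2, h3, PySem.List.pySetD_natCast]
  simp only [hfun]
  rw [pvSetFold (fun k : Nat => ((k : Int) + 1)) n.toNat (List.replicate n.toNat 0) (by simp)]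
  simp

theorem pvPos_eq_posN (m : Nat) : pvPos (m : Int) = (pvPosN m : Int) := by
  induction m using Nat.strong_induction_on with
  | _ m ih =>
    by_cases h : m ≤ 1
    · rw [pvPos, dif_pos (by exact_mod_cast h), pvPosN_base m h]
      simp
    · have h1 : ¬ ((m : Int) ≤ 1) := by omega
      rw [pvPos, dif_neg h1, pvPosN_step m (by omega)]
      simp only [PySem.Int.floordiv_eq_ediv_of_pos (by omega : (0:Int) < 3),
        PySem.Int.floordiv_eq_ediv_of_pos (by omega : (0:Int) < 2)]
      have hm2 : (m : Int) - ((m : Int) + 2) / 3 = ((m - (m + 2) / 3 : Nat) : Int) := by omega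
      rw [hm2, ih (m - (m + 2) / 3) (by omega)]
      have hplt : pvPosN (m - (m + 2) / 3) < m - (m + 2) / 3 :=
        pvPosN_lt _ (by omega)
      have hj : ((m - (m + 2) / 3 : Nat) : Int) - 1 - (pvPosN (m - (m + 2) / 3) : Int) =
          ((m - (m + 2) / 3 - 1 - pvPosN (m - (m + 2) / 3) : Nat) : Int) := by omega
      rw [hj]
      have hdiv : ((m - (m + 2) / 3 - 1 - pvPosN (m - (m + 2) / 3) : Nat) : Int) / 2 =
          (((m - (m + 2) / 3 - 1 - pvPosN (m - (m + 2) / 3)) / 2 : Nat) : Int) := by omega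
      rw [hdiv]
      push_cast
      ring

-- ===== VERDICT (by name: the statement is the Claim_ definition above) =====
theorem lastRemaining_spec : Claim_equal_lastRemaining := by
  intro n _ hpre
  unfold Pre_lastRemaining at hpre
  unfold Spec_lastRemaining lastRemaining lastRemaining_alt
  rw [pvBuild_eq n (by omega)]
  have hN : 0 < n.toNat := by omega
  rw [pvSweep_eq _ (by simp; omega)]
  have hlen : ((List.range n.toNat).map (fun k : Nat => ((k : Int) + 1))).length = n.toNat := by simp
  rw [hlen]
  have hplt : pvPosN n.toNat < n.toNat := pvPosN_lt _ hN
  rw [List.getElem?_map, List.getElem?_range hplt]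
  have hn : n = (n.toNat : Int) := by omega
  rw [hn, pvPos_eq_posN]
  simp [PySem.List.pyGetD_zero, Option.toList]
  congr 1
  omega
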